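-- pv_equiv track=rewrite | github.com/riniel-rodrigo/bat-wiki | src/batch_openai/tools/input_builder.py | _aggregate_deps_content
-- ===== SOURCE A (Python) =====
-- from typing import Dict, List, Any, Optional, Tuple
--
-- def _aggregate_deps_content(deps: List[Dict[str, Any]], max_chars: int = 6000) -> str:
--     parts: List[str] = []
--     acc = 0
--     for d in deps:
--         nm = d.get("name") or "dep"
--         body = d.get("content") or ""
--         if not isinstance(body, str) or not body.strip():
--             continue
--         snippet = f"// DEP: {nm}\n" + body.strip() + "\n"
--         if acc + len(snippet) > max_chars:
--             break
--         parts.append(snippet)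
--         acc += len(snippet)
--     return "\n".join(parts)
-- ===== SOURCE B (Python) =====
-- def _aggregate_deps_content(deps, max_chars=6000):
--     snippets = [
--         "// DEP: %s\n%s\n" % (d.get("name") or "dep", body.strip())
--         for d in deps
--         for body in [d.get("content") or ""]
--         if isinstance(body, str) and body.strip()
--     ]
--     totals = []
--     running = 0
--     for s in snippets:
--         running += len(s)
--         totals.append(running)
--     k = next((i for i, t in enumerate(totals) if t > max_chars), len(snippets))
--     return "\n".join(snippets[:k])
-- ===== Notes on version B (the rewrite author's own statement) =====
-- stated objective: alternative
-- what changed: Replaces A's single break-early loop with a running character accumulator by a three-stage pipeline: a comprehension building all formatted snippets, a running-totals pass, and a cut at the first index whose cumulative total exceeds max_chars.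
import Mathlib
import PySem

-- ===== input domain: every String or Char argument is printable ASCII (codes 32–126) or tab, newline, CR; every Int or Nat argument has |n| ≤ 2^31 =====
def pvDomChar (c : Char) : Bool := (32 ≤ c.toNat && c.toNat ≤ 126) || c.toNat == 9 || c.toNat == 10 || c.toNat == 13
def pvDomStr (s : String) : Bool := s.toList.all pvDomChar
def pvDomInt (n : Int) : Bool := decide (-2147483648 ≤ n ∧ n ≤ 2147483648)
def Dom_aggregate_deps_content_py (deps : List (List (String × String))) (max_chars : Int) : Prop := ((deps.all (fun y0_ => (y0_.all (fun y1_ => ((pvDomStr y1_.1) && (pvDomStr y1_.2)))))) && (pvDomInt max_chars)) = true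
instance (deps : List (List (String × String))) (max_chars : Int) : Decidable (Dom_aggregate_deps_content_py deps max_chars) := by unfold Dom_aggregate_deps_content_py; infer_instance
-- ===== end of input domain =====

-- B replaces A's single break-early accumulator loop by a filter-format comprehension,
-- a running-totals pass and a first-overflow index cut (objective: alternative decomposition, same cost).

-- ===== PORT A =====
-- shared with B: `d.get(key) or default` — first-match assoc lookup, falsy ('' or missing) replaced
def pvGetOr (d : List (String × String)) (key dflt : String) : String :=
  match d.find? (fun p => p.1 == key) with
  | none => dflt
  | some p => if p.2 == "" then dflt else p.2

-- the for-loop of A with its state (parts, acc); `break` returns parts as built so far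
def aggLoopA (ds : List (List (String × String))) (parts : List String) (acc : Int)
    (max_chars : Int) : List String :=
  match ds with
  | [] => parts
  | d :: rest =>
    let nm := pvGetOr d "name" "dep"
    let body := pvGetOr d "content" ""
    -- `isinstance(body, str)` is always true under the type convention (values are strings)
    if PySem.Str.strip body == "" then aggLoopA rest parts acc max_chars
    else
      let snippet := "// DEP: " ++ nm ++ "\n" ++ PySem.Str.strip body ++ "\n"
      if max_chars < acc + PySem.Str.len snippet then parts
      else aggLoopA rest (parts ++ [snippet]) (acc + PySem.Str.len snippet) max_chars

def aggregate_deps_content_py (deps : List (List (String × String))) (max_chars : Int) : String :=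
  PySem.Str.join "\n" (aggLoopA deps [] 0 max_chars)

-- ===== PORT B =====
-- one comprehension element: the formatted snippet, or none when the body strips to nothing
def snippetOf (d : List (String × String)) : Option String :=
  let body := pvGetOr d "content" ""
  if PySem.Str.strip body == "" then none
  else some ("// DEP: " ++ pvGetOr d "name" "dep" ++ "\n" ++ PySem.Str.strip body ++ "\n")

-- the running-totals pass (B's `running`/`totals` loop)
def runTotals (running : Int) (ss : List String) : List Int :=
  match ss with
  | [] => []
  | s :: rest => (running + PySem.Str.len s) :: runTotals (running + PySem.Str.len s) rest

def aggregate_deps_content_py_alt (deps : List (List (String × String))) (max_chars : Int) : String :=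
  let snippets := deps.filterMap snippetOf
  let totals := runTotals 0 snippets
  let k := totals.findIdx (fun t => max_chars < t)
  PySem.Str.join "\n" (snippets.take k)

-- ===== PRECONDITION & SPEC =====
def Spec_aggregate_deps_content_py (deps : List (List (String × String))) (max_chars : Int) (out : String) : Prop := out = aggregate_deps_content_py_alt deps max_chars
instance (deps : List (List (String × String))) (max_chars : Int) (out : String) : Decidable (Spec_aggregate_deps_content_py deps max_chars out) := by unfold Spec_aggregate_deps_content_py; infer_instance

-- ===== CLAIM (what is proved, stated in full; the proofs are below) =====
def Claim_equal_aggregate_deps_content_py : Prop := ∀ (deps : List (List (String × String))) (max_chars : Int), Dom_aggregate_deps_content_py deps max_chars → Spec_aggregate_deps_content_py deps max_chars (aggregate_deps_content_py deps max_chars)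

-- ===== LEMMAS AND PROOFS =====

-- the common denominator: greedy prefix under a budget, stopping at the first overflow
def prefixUnder (ss : List String) (acc max_chars : Int) : List String :=
  match ss with
  | [] => []
  | s :: rest =>
    if max_chars < acc + PySem.Str.len s then []
    else s :: prefixUnder rest (acc + PySem.Str.len s) max_chars

theorem aggLoopA_eq (ds : List (List (String × String))) (parts : List String)
    (acc max_chars : Int) :
    aggLoopA ds parts acc max_chars =
      parts ++ prefixUnder (ds.filterMap snippetOf) acc max_chars := by
  induction ds generalizing parts acc with
  | nil => simp [aggLoopA, prefixUnder]
  | cons d rest ih =>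
    rw [aggLoopA, List.filterMap_cons]
    by_cases h1 : PySem.Str.strip (pvGetOr d "content" "") = ""
    · rw [snippetOf]
      simp only [h1, beq_self_eq_true, if_true]
      exact ih parts acc
    · rw [snippetOf]
      simp only [beq_iff_eq, h1, if_false]
      rw [prefixUnder]
      by_cases h2 : max_chars < acc + PySem.Str.len ("// DEP: " ++ pvGetOr d "name" "dep" ++ "\n" ++ PySem.Str.strip (pvGetOr d "content" "") ++ "\n")
      · rw [if_pos h2, if_pos h2]
        simp
      · rw [if_neg h2, if_neg h2, ih]
        simp

theorem take_findIdx_eq (ss : List String) (acc max_chars : Int) :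
    ss.take ((runTotals acc ss).findIdx (fun t => max_chars < t)) =
      prefixUnder ss acc max_chars := by
  induction ss generalizing acc with
  | nil => simp [runTotals, prefixUnder]
  | cons s rest ih =>
    rw [runTotals, prefixUnder, List.findIdx_cons]
    by_cases h : max_chars < acc + PySem.Str.len s
    · rw [if_pos h]
      simp only [decide_eq_true h, cond_true, List.take_zero]
    · rw [if_neg h]
      simp only [decide_eq_false h, cond_false, List.take_succ_cons, ih]

-- ===== VERDICT (by name: the statement is the Claim_ definition above) =====
theorem aggregate_deps_content_py_spec : Claim_equal_aggregate_deps_content_py := by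
  intro deps max_chars _
  unfold Spec_aggregate_deps_content_py aggregate_deps_content_py aggregate_deps_content_py_alt
  show PySem.Str.join "\n" (aggLoopA deps [] 0 max_chars) =
    PySem.Str.join "\n" ((deps.filterMap snippetOf).take
      ((runTotals 0 (deps.filterMap snippetOf)).findIdx (fun t => max_chars < t)))
  rw [aggLoopA_eq, take_findIdx_eq, List.nil_append]
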